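-- pv_equiv track=rewrite | github.com/benczech212/RGB-Encoder-Device | cirpy/test_light_box_rainbow.py | wheel
-- ===== SOURCE A (Python) =====
-- def wheel(pos):
--     # Return (R, G, B) for a given position on the color wheel
--     # if pos < 0 or pos > 255:
--     pos %= 256
--     while pos < 0:
--         pos += 256
--     if pos < 85:
--         return (255 - pos * 3, pos * 3, 0)
--     elif pos < 170:
--         pos -= 85
--         return (0, 255 - pos * 3, pos * 3)
--     else:
--         pos -= 170
--         return (pos * 3, 0, 255 - pos * 3)
-- ===== SOURCE B (Python) =====
-- def wheel(pos):
--     # Branchless closed form: each RGB channel is a clamped triangle wave of the tripled position.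
--     p3 = (pos % 256) * 3
--     r = max(0, max(255 - p3, p3 - 510))
--     g = max(0, min(p3, 510 - p3))
--     b = max(0, min(p3 - 255, 765 - p3))
--     return (r, g, b)
-- ===== Notes on version B (the rewrite author's own statement) =====
-- stated objective: alternative
-- what changed: Replaces A's segmented if/elif ramps by a branchless closed form: each RGB channel is computed directly as a clamped triangle wave of the tripled position using only min/max arithmetic, with no segment selection at all.
import Mathlib
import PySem

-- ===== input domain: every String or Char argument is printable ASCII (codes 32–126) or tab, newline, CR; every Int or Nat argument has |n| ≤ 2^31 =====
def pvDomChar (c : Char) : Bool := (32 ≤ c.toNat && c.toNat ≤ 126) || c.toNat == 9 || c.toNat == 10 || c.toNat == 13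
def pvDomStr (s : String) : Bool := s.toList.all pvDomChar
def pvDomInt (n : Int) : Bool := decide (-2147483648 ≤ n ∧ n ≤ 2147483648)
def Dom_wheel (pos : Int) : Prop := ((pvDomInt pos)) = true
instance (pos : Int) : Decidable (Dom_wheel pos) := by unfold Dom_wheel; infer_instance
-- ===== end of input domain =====

-- B is a branchless closed form: each channel is a clamped triangle wave of the tripled position via min/max (objective: alternative, same cost).

-- ===== PORT A =====
-- the 'while pos < 0: pos += 256' loop of A, transliterated as structural recursion
def wheelWhile (p : Int) : Int :=
  if p < 0 then wheelWhile (p + 256) else p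
termination_by (-p).toNat
decreasing_by omega

def wheel (pos : Int) : Int × Int × Int :=
  let pos := PySem.Int.mod pos 256
  let pos := wheelWhile pos
  if pos < 85 then (255 - pos * 3, pos * 3, 0)
  else if pos < 170 then
    let pos := pos - 85
    (0, 255 - pos * 3, pos * 3)
  else
    let pos := pos - 170
    (pos * 3, 0, 255 - pos * 3)

-- ===== PORT B =====
def wheel_alt (pos : Int) : Int × Int × Int :=
  let p3 := (PySem.Int.mod pos 256) * 3
  (max 0 (max (255 - p3) (p3 - 510)),
   max 0 (min p3 (510 - p3)),
   max 0 (min (p3 - 255) (765 - p3)))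

-- ===== PRECONDITION & SPEC =====
def Spec_wheel (pos : Int) (out : Int × Int × Int) : Prop := out = wheel_alt pos
instance (pos : Int) (out : Int × Int × Int) : Decidable (Spec_wheel pos out) := by unfold Spec_wheel; infer_instance

-- ===== CLAIM (what is proved, stated in full; the proofs are below) =====
def Claim_equal_wheel : Prop := ∀ (pos : Int), Dom_wheel pos → Spec_wheel pos (wheel pos)

-- ===== LEMMAS AND PROOFS =====
theorem wheelWhile_of_nonneg (p : Int) (h : 0 ≤ p) : wheelWhile p = p := by
  unfold wheelWhile
  simp [not_lt.mpr h]

-- ===== VERDICT (by name: the statement is the Claim_ definition above) =====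
theorem wheel_spec : Claim_equal_wheel := by
  intro pos _
  unfold Spec_wheel wheel wheel_alt
  have h0 : 0 ≤ PySem.Int.mod pos 256 := PySem.Int.mod_nonneg _ (by norm_num)
  have h1 : PySem.Int.mod pos 256 < 256 := PySem.Int.mod_lt _ (by norm_num)
  set m := PySem.Int.mod pos 256 with hm
  simp only [wheelWhile_of_nonneg m h0]
  split_ifs with hA hB <;>
    simp only [Prod.mk.injEq, max_def, min_def] <;>
    split_ifs <;> omega
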